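-- pv_equiv track=rewrite | github.com/Dead-Stone/ScorePAL | backend/file_dump_processor.py | _analyze_js_code
-- ===== SOURCE A (Python) =====
-- from typing import Dict, List, Any, Optional, Tuple
--
-- def _analyze_js_code(content: str) -> Dict[str, Any]:
--     """Analyze JavaScript/TypeScript-specific code metrics."""
--     lines = content.split('\n')
--
--     comment_lines = len([line for line in lines if line.strip().startswith(('//', '/*', '*'))])
--     function_count = content.count('function ') + content.count('=>')
--     class_count = content.count('class ')
--
--     return {
--         "comment_lines": comment_lines,
--         "function_count": function_count,
--         "class_count": class_count
--     }
-- ===== SOURCE B (Python) =====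
-- def _analyze_js_code(content: str):
--     """Analyze JS/TS metrics with one character-level finite-state scan (no split, no str.count)."""
--     comment_lines = 0
--     function_count = 0
--     class_count = 0
--     state = 0  # 0 = in a line's leading whitespace, 1 = first non-ws char was '/', 2 = line decided
--     recent = ''  # sliding window of the last <= 9 characters seen
--     for c in content:
--         recent = (recent + c)[-9:]
--         if recent.endswith('function '):
--             function_count += 1
--         if recent.endswith('=>'):
--             function_count += 1
--         if recent.endswith('class '):
--             class_count += 1
--         if c == '\n':
--             state = 0
--         elif state == 0:
--             if c.isspace():
--                 pass
--             elif c == '*':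
--                 comment_lines += 1
--                 state = 2
--             elif c == '/':
--                 state = 1
--             else:
--                 state = 2
--         elif state == 1:
--             if c == '/' or c == '*':
--                 comment_lines += 1
--             state = 2
--     return {
--         "comment_lines": comment_lines,
--         "function_count": function_count,
--         "class_count": class_count
--     }
-- ===== Notes on version B (the rewrite author's own statement) =====
-- stated objective: alternative
-- what changed: Replaces split + filter comprehension + three whole-content str.count scans by a single character-level finite-state machine: one pass over the characters with a line-start DFA for comment lines and a 9-character sliding window whose endswith tests count pattern occurrences (correct because the three patterns are border-free, so non-overlapping count = number of match end positions).
import Mathlib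
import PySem

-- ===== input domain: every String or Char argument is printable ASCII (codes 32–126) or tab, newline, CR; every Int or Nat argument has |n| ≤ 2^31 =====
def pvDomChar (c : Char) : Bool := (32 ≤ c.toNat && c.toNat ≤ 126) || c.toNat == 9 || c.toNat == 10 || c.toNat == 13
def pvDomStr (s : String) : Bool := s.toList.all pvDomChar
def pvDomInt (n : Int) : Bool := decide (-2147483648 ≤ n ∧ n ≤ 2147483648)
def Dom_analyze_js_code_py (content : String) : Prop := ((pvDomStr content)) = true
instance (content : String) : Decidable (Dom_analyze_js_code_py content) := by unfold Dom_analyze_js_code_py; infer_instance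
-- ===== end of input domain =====

-- B replaces A's split + filter comprehension + three whole-content str.count scans by a single
-- character-level finite-state machine (line-start DFA + 9-char sliding window); alternative
-- algorithm, same asymptotic cost.

-- ===== PORT A =====
def analyze_js_code_py (content : String) : List (String × Int) :=
  let lines := (PySem.Str.split? content "\n").getD []
  let comment_lines : Int :=
    ((lines.filter (fun line =>
        PySem.Str.startswith (PySem.Str.strip line) "//" ||
        PySem.Str.startswith (PySem.Str.strip line) "/*" ||
        PySem.Str.startswith (PySem.Str.strip line) "*")).length : Int)
  let function_count : Int :=
    (PySem.Str.count content "function " : Int) + (PySem.Str.count content "=>" : Int)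
  let class_count : Int := (PySem.Str.count content "class " : Int)
  [("comment_lines", comment_lines),
   ("function_count", function_count),
   ("class_count", class_count)]

-- ===== PORT B =====
-- loop body of Source B's single for-loop; state = (comment_lines, function_count, class_count, state, recent)
def pvStepB (t : Int × Int × Int × Int × List Char) (c : Char) : Int × Int × Int × Int × List Char :=
  let recent := PySem.Chars.slice (t.2.2.2.2 ++ [c]) (some (-9)) none   -- (recent + c)[-9:]
  let fc : Int := t.2.1
    + (if PySem.Chars.endswith recent ("function ".toList) then 1 else 0)
    + (if PySem.Chars.endswith recent ("=>".toList) then 1 else 0)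
  let kc : Int := t.2.2.1 + (if PySem.Chars.endswith recent ("class ".toList) then 1 else 0)
  let cs : Int × Int :=
    if c = '\n' then (t.1, 0)
    else if t.2.2.2.1 = 0 then
      (if PySem.Chars.isspace c then (t.1, 0)
       else if c = '*' then (t.1 + 1, 2)
       else if c = '/' then (t.1, 1)
       else (t.1, 2))
    else if t.2.2.2.1 = 1 then
      (if c = '/' ∨ c = '*' then t.1 + 1 else t.1, 2)
    else (t.1, t.2.2.2.1)
  (cs.1, fc, kc, cs.2, recent)

def analyze_js_code_py_alt (content : String) : List (String × Int) :=
  let fin := content.toList.foldl pvStepB (0, 0, 0, 0, [])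
  [("comment_lines", fin.1),
   ("function_count", fin.2.1),
   ("class_count", fin.2.2.1)]

-- ===== PRECONDITION & SPEC =====
def Spec_analyze_js_code_py (content : String) (out : List (String × Int)) : Prop := out = analyze_js_code_py_alt content
instance (content : String) (out : List (String × Int)) : Decidable (Spec_analyze_js_code_py content out) := by unfold Spec_analyze_js_code_py; infer_instance

-- ===== CLAIM (what is proved, stated in full; the proofs are below) =====
def Claim_equal_analyze_js_code_py : Prop := ∀ (content : String), Dom_analyze_js_code_py content → Spec_analyze_js_code_py content (analyze_js_code_py content)

-- ===== LEMMAS AND PROOFS =====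

-- ---------- proof-side recursive descriptions of B's machine ----------

def pvPush (w : List Char) (c : Char) : List Char :=
  PySem.Chars.slice (w ++ [c]) (some (-9)) none

def pvIncr (st : Int) (c : Char) : Int :=
  if c = '\n' then 0
  else if st = 0 then (if PySem.Chars.isspace c then 0 else if c = '*' then 1 else 0)
  else if st = 1 then (if c = '/' ∨ c = '*' then 1 else 0)
  else 0

def pvNext (st : Int) (c : Char) : Int :=
  if c = '\n' then 0
  else if st = 0 then (if PySem.Chars.isspace c then 0 else if c = '*' then 2 else if c = '/' then 1 else 2)
  else if st = 1 then 2
  else st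

def pvC : Int → List Char → Int
  | _, [] => 0
  | st, c :: t => pvIncr st c + pvC (pvNext st c) t

def pvS : Int → List Char → Int
  | st, [] => st
  | st, c :: t => pvS (pvNext st c) t

def pvW : List Char → List Char → List Char
  | w, [] => w
  | w, c :: t => pvW (pvPush w c) t

def pvF (p : List Char) : List Char → List Char → Int
  | _, [] => 0
  | w, c :: t => (if PySem.Chars.endswith (pvPush w c) p then 1 else 0) + pvF p (pvPush w c) t

def pvWin (h : List Char) : List Char := h.drop (h.length - 9)

def pvE (p : List Char) : List Char → List Char → Int
  | _, [] => 0
  | h, c :: t => (if p.isSuffixOf (h ++ [c]) then 1 else 0) + pvE p (h ++ [c]) t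

def pvOcc (p s : List Char) : Nat :=
  (List.range s.length).countP (fun i => p.isPrefixOf (s.drop i))

def pvPred (l : List Char) : Bool :=
  PySem.Chars.startswith (PySem.Chars.strip l) ("//".toList) ||
  PySem.Chars.startswith (PySem.Chars.strip l) ("/*".toList) ||
  PySem.Chars.startswith (PySem.Chars.strip l) ("*".toList)

def pvBorderFree (p : List Char) : Prop :=
  ∀ k < p.length, 0 < k → ¬ (p.drop k <+: p)

-- ---------- fold decomposition ----------

theorem pv_step_eq (t : Int × Int × Int × Int × List Char) (c : Char) :
    pvStepB t c =
      (t.1 + pvIncr t.2.2.2.1 c,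
       t.2.1 + (if PySem.Chars.endswith (pvPush t.2.2.2.2 c) ("function ".toList) then 1 else 0)
             + (if PySem.Chars.endswith (pvPush t.2.2.2.2 c) ("=>".toList) then 1 else 0),
       t.2.2.1 + (if PySem.Chars.endswith (pvPush t.2.2.2.2 c) ("class ".toList) then 1 else 0),
       pvNext t.2.2.2.1 c,
       pvPush t.2.2.2.2 c) := by
  simp only [pvStepB, pvIncr, pvNext, pvPush]
  split_ifs <;> simp

theorem pv_fold_decomp : ∀ (s : List Char) (cc fc kc st : Int) (w : List Char),
    s.foldl pvStepB (cc, fc, kc, st, w) =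
      (cc + pvC st s,
       fc + pvF ("function ".toList) w s + pvF ("=>".toList) w s,
       kc + pvF ("class ".toList) w s,
       pvS st s,
       pvW w s) := by
  intro s
  induction s with
  | nil => intro cc fc kc st w; simp [pvC, pvF, pvS, pvW]
  | cons c t ih =>
    intro cc fc kc st w
    rw [List.foldl_cons, pv_step_eq, ih]
    simp only [pvC, pvF, pvS, pvW, Prod.mk.injEq]
    constructor
    · ring
    constructor
    · ring
    constructor
    · ring
    trivial

-- ---------- window adequacy ----------

theorem pv_push_eq (w : List Char) (c : Char) :
    pvPush w c = (w ++ [c]).drop ((w ++ [c]).length - 9) := by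
  unfold pvPush
  rw [PySem.Chars.slice_eq_listSlice]
  rw [PySem.List.slice_from_neg_ofNat (w ++ [c]) 9 (by omega)]

theorem pv_push_win (h : List Char) (c : Char) :
    pvPush (pvWin h) c = pvWin (h ++ [c]) := by
  rw [pv_push_eq]
  unfold pvWin
  rw [List.drop_append_of_le_length (by simp),
      List.drop_append_of_le_length (by simp)]
  rw [List.drop_drop]
  congr 2
  simp [List.length_drop]
  omega

theorem pv_endswith_win (p h : List Char) (hp : p.length ≤ 9) :
    PySem.Chars.endswith (pvWin h) p = p.isSuffixOf h := by
  simp only [PySem.Chars.endswith, pvWin]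
  by_cases hs : p.isSuffixOf h
  · simp only [hs]
    rw [List.isSuffixOf_iff_suffix] at hs ⊢
    by_cases hl : h.length ≤ 9
    · simpa [Nat.sub_eq_zero_of_le hl] using hs
    · have hwin : h.drop (h.length - 9) <:+ h := List.drop_suffix _ _
      have hlen : (h.drop (h.length - 9)).length = 9 := by simp [List.length_drop]; omega
      rcases List.suffix_or_suffix_of_suffix hs hwin with h1 | h2
      · exact h1
      · have : h.drop (h.length - 9) = p := List.IsSuffix.eq_of_length_le h2 (by omega)
        rw [this]
  · simp only [hs]
    rw [Bool.eq_false_iff]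
    intro hc
    rw [List.isSuffixOf_iff_suffix] at hc
    exact absurd (List.isSuffixOf_iff_suffix.mpr (hc.trans (List.drop_suffix _ _))) (by simpa using hs)

theorem pv_F_eq_E (p : List Char) (hp : p.length ≤ 9) :
    ∀ (s h : List Char), pvF p (pvWin h) s = pvE p h s := by
  intro s
  induction s with
  | nil => intro h; simp [pvF, pvE]
  | cons c t ih =>
    intro h
    rw [pvF, pvE, pv_push_win, pv_endswith_win p _ hp, ih]

-- ---------- occurrence counting ----------

theorem pv_countP_range_flip (f f' : Nat → Bool) : ∀ (n j : Nat), j < n → f j = false → f' j = true →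
    (∀ i, i < n → i ≠ j → f' i = f i) →
    (List.range n).countP f' = (List.range n).countP f + 1 := by
  intro n
  induction n with
  | zero => intro j hj; omega
  | succ m ih =>
    intro j hj hfj hf'j hoth
    rw [List.range_succ, List.countP_append, List.countP_append]
    by_cases hjm : j = m
    · subst hjm
      have : (List.range j).countP f' = (List.range j).countP f := by
        apply List.countP_congr
        intro i hi
        rw [hoth i (by have := List.mem_range.mp hi; omega) (by have := List.mem_range.mp hi; omega)]
      rw [this]
      simp [hfj, hf'j]
    · have hlast : f' m = f m := hoth m (Nat.lt_succ_self m) (fun h => hjm h.symm)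
      rw [ih j (by omega) hfj hf'j (fun i hi hij => hoth i (by omega) hij)]
      simp only [List.countP_cons, List.countP_nil, hlast]
      omega

-- p cannot be a prefix of drop i (u++[c]) without being one of drop i u, unless the match ends at the new char

theorem pv_prefix_snoc (p u : List Char) (c : Char) (i : Nat) (hi : i ≤ u.length)
    (hne : i + p.length ≠ u.length + 1) :
    p.isPrefixOf (List.drop i (u ++ [c])) = p.isPrefixOf (List.drop i u) := by
  rw [List.drop_append_of_le_length hi]
  by_cases h : (p.isPrefixOf (List.drop i u) = true)
  · rw [h]
    rw [List.isPrefixOf_iff_prefix] at h ⊢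
    exact h.trans (List.prefix_append _ _)
  · rw [Bool.eq_false_iff.mpr h, Bool.eq_false_iff]
    intro hc
    rw [List.isPrefixOf_iff_prefix] at hc
    apply h
    rw [List.isPrefixOf_iff_prefix]
    have hlen : p.length ≤ u.length - i + 1 := by
      have := hc.length_le
      simpa [List.length_drop] using this
    have hlt : p.length ≤ u.length - i := by omega
    have h1 : p = (List.drop i u ++ [c]).take p.length := List.prefix_iff_eq_take.mp hc
    rw [List.take_append_of_le_length (by simpa [List.length_drop] using hlt)] at h1
    rw [h1]
    exact List.take_prefix _ _

theorem pv_occ_snoc (p : List Char) (hp : 2 <= p.length) (u : List Char) (c : Char) :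
    pvOcc p (u ++ [c]) = pvOcc p u + (if p.isSuffixOf (u ++ [c]) then 1 else 0) := by
  unfold pvOcc
  have hlen : (u ++ [c]).length = u.length + 1 := by simp
  rw [hlen, List.range_succ, List.countP_append]
  have hlastf : p.isPrefixOf (List.drop u.length (u ++ [c])) = false := by
    rw [List.drop_append_of_le_length (le_refl _)]
    simp only [List.drop_length, List.nil_append]
    rw [Bool.eq_false_iff]
    intro hc
    rw [List.isPrefixOf_iff_prefix] at hc
    have := hc.length_le
    simp at this
    omega
  by_cases hs : (p.isSuffixOf (u ++ [c]) = true)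
  · rw [hs, if_pos rfl]
    rw [List.isSuffixOf_iff_suffix] at hs
    obtain ⟨v, hv⟩ := hs
    have hplen : p.length ≤ u.length + 1 := by
      have := congrArg List.length hv
      simp at this
      omega
    set j := u.length + 1 - p.length with hjdef
    have hvlen : v.length = j := by
      have := congrArg List.length hv
      simp at this
      omega
    have hjlt : j < u.length := by omega
    have hf'j : p.isPrefixOf (List.drop j (u ++ [c])) = true := by
      rw [← hv, ← hvlen, List.drop_left]
      rw [List.isPrefixOf_iff_prefix]
    have hfj : p.isPrefixOf (List.drop j u) = false := by
      rw [Bool.eq_false_iff]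
      intro hc
      rw [List.isPrefixOf_iff_prefix] at hc
      have := hc.length_le
      simp [List.length_drop] at this
      omega
    rw [pv_countP_range_flip _ _ u.length j hjlt hfj hf'j
      (fun i hi hij => pv_prefix_snoc p u c i (by omega) (by omega))]
    have hnp : ¬ (p <+: [c]) := by
      intro hc
      have := hc.length_le
      simp at this
      omega
    simp [hnp]
  · rw [Bool.eq_false_iff.mpr hs, if_neg (by simp)]
    have : (List.range u.length).countP (fun i => p.isPrefixOf (List.drop i (u ++ [c]))) =
        (List.range u.length).countP (fun i => p.isPrefixOf (List.drop i u)) := by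
      apply List.countP_congr
      intro i hi
      have hilt : i < u.length := List.mem_range.mp hi
      by_cases hne : i + p.length = u.length + 1
      ·
        have h2 : p.isPrefixOf (List.drop i (u ++ [c])) = false := by
          rw [Bool.eq_false_iff]
          intro hc
          rw [List.isPrefixOf_iff_prefix] at hc
          have hdl : (List.drop i (u ++ [c])).length = p.length := by
            simp [List.length_drop]
            omega
          have heq : List.drop i (u ++ [c]) = p := by
            have h4 := List.prefix_iff_eq_take.mp hc
            rw [← hdl, List.take_length] at h4
            exact h4.symm
          apply hs
          rw [List.isSuffixOf_iff_suffix, ← heq]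
          exact List.drop_suffix _ _
        have h3 : p.isPrefixOf (List.drop i u) = false := by
          rw [Bool.eq_false_iff]
          intro hc
          rw [List.isPrefixOf_iff_prefix] at hc
          have := hc.length_le
          simp [List.length_drop] at this
          omega
        rw [h2, h3]
      · rw [pv_prefix_snoc p u c i (by omega) hne]
    rw [this]
    have hnp : ¬ (p <+: [c]) := by
      intro hc
      have := hc.length_le
      simp at this
      omega
    show _ + List.countP _ [u.length] = _ + 0
    have h1 : List.countP (fun i => p.isPrefixOf (List.drop i (u ++ [c]))) [u.length] = 0 := by
      rw [List.countP_cons, List.countP_nil, hlastf]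
      simp
    omega


theorem pv_E_occ (p : List Char) (hp : 2 ≤ p.length) :
    ∀ (s h : List Char), pvE p h s = (pvOcc p (h ++ s) : Int) - (pvOcc p h : Int) := by
  intro s
  induction s with
  | nil => intro h; simp [pvE]
  | cons c t ih =>
    intro h
    rw [pvE, ih (h ++ [c]), pv_occ_snoc p hp h c]
    have : h ++ [c] ++ t = h ++ (c :: t) := by simp
    rw [this]
    push_cast
    split_ifs <;> ring

-- count.go bookkeeping (used by pv_count_cons)
theorem pv_cgo_acc (sub : List Char) : ∀ (fuel : Nat) (l : List Char) (acc : Nat),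
    PySem.Chars.count.go sub fuel l acc = acc + PySem.Chars.count.go sub fuel l 0 := by
  intro fuel
  induction fuel with
  | zero => intro l acc; simp [PySem.Chars.count.go]
  | succ f ih =>
    intro l acc
    cases l with
    | nil => simp [PySem.Chars.count.go]
    | cons h t =>
      rw [PySem.Chars.count.go, PySem.Chars.count.go]
      split
      · rw [ih _ (acc + 1), ih _ (0 + 1)]; omega
      · rw [ih t acc]

theorem pv_cgo_stable (sub : List Char) (hsub : sub ≠ []) : ∀ (n fuel fuel' : Nat) (l : List Char),
    l.length ≤ n → l.length ≤ fuel → l.length ≤ fuel' →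
    PySem.Chars.count.go sub fuel l 0 = PySem.Chars.count.go sub fuel' l 0 := by
  intro n
  induction n with
  | zero =>
    intro fuel fuel' l hn _ _
    have : l = [] := List.eq_nil_of_length_eq_zero (Nat.le_zero.mp hn)
    subst this
    cases fuel <;> cases fuel' <;> simp [PySem.Chars.count.go]
  | succ m ih =>
    intro fuel fuel' l hn hf hf'
    cases l with
    | nil => cases fuel <;> cases fuel' <;> simp [PySem.Chars.count.go]
    | cons h t =>
      simp only [List.length_cons] at hn hf hf'
      obtain ⟨f, rfl⟩ : ∃ f, fuel = f + 1 := ⟨fuel - 1, by omega⟩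
      obtain ⟨f', rfl⟩ : ∃ f', fuel' = f' + 1 := ⟨fuel' - 1, by omega⟩
      rw [PySem.Chars.count.go, PySem.Chars.count.go]
      have hs1 : 1 ≤ sub.length := by
        cases sub with
        | nil => exact absurd rfl hsub
        | cons a b => simp
      split
      · rw [pv_cgo_acc sub f _ (0+1), pv_cgo_acc sub f' _ (0+1)]
        have hd : (List.drop sub.length (h :: t)).length ≤ m := by
          simp [List.length_drop]; omega
        rw [ih f f' _ hd (by simp [List.length_drop]; omega) (by simp [List.length_drop]; omega)]
      · exact ih f f' t (by omega) (by omega) (by omega)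

theorem pv_count_nil (sub : List Char) (hsub : sub ≠ []) : PySem.Chars.count [] sub = 0 := by
  simp [PySem.Chars.count, PySem.Chars.count.go, List.isEmpty_iff, hsub]

theorem pv_count_cons (sub : List Char) (hsub : sub ≠ []) (h : Char) (t : List Char) :
    PySem.Chars.count (h :: t) sub =
      if sub.isPrefixOf (h :: t) then 1 + PySem.Chars.count (List.drop sub.length (h :: t)) sub
      else PySem.Chars.count t sub := by
  have hs1 : 1 ≤ sub.length := by
    cases sub with
    | nil => exact absurd rfl hsub
    | cons a b => simp
  have hne : ¬ (sub.isEmpty = true) := by simp [hsub]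
  simp only [PySem.Chars.count, hne, List.length_cons]
  by_cases hp : sub.isPrefixOf (h :: t)
  · rw [PySem.Chars.count.go, if_pos hp, if_pos hp]
    rw [pv_cgo_acc sub t.length _ (0+1)]
    rw [pv_cgo_stable sub hsub (List.drop sub.length (h :: t)).length t.length
        ((h :: t).length - sub.length) (List.drop sub.length (h :: t))
        (by simp) (by simp [List.length_drop]; omega) (by simp [List.length_drop])]
    simp
  · rw [PySem.Chars.count.go, if_neg hp, if_neg hp]
    simp

theorem pv_count_eq_occ (p : List Char) (hp : 2 ≤ p.length) (hbf : pvBorderFree p) :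
    ∀ (n : Nat) (s : List Char), s.length ≤ n → PySem.Chars.count s p = pvOcc p s := by
  have hpne : p ≠ [] := by intro h; subst h; simp at hp
  intro n
  induction n with
  | zero =>
    intro s hn
    have : s = [] := List.eq_nil_of_length_eq_zero (Nat.le_zero.mp hn)
    subst this
    rw [pv_count_nil p hpne]
    simp [pvOcc]
  | succ m ih =>
    intro s hn
    cases s with
    | nil =>
      rw [pv_count_nil p hpne]
      simp [pvOcc]
    | cons c t =>
      rw [pv_count_cons p hpne c t]
      by_cases hpre : (p.isPrefixOf (c :: t) = true)
      · rw [if_pos hpre]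
        rw [List.isPrefixOf_iff_prefix] at hpre
        have hlen : p.length ≤ (c :: t).length := hpre.length_le
        set s := c :: t with hsdef
        -- occ side
        have hocc : pvOcc p s = 1 + pvOcc p (s.drop p.length) := by
          unfold pvOcc
          have hsplit : s.length = p.length + (s.length - p.length) := by omega
          rw [hsplit, List.range_add, List.countP_append]
          have h1 : (List.range p.length).countP (fun i => p.isPrefixOf (s.drop i)) = 1 := by
            have hcongr : ∀ i ∈ List.range p.length,
                ((p.isPrefixOf (s.drop i)) = true ↔ ((i == 0) = true)) := by
              intro i hi
              have hilt : i < p.length := List.mem_range.mp hi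
              by_cases hi0 : i = 0
              · subst hi0
                simp only [List.drop_zero, List.isPrefixOf_iff_prefix, beq_self_eq_true]
                simp [hpre]
              · have : ¬ (p <+: s.drop i) := by
                  intro hc
                  obtain ⟨r, hr⟩ := hpre
                  have hdrop : s.drop i = p.drop i ++ r := by
                    rw [← hr, List.drop_append_of_le_length (by omega)]
                  rw [hdrop] at hc
                  have h4 := List.prefix_iff_eq_take.mp hc
                  have e1 : p.take (p.length - i) = (p.drop i ++ r).take (p.length - i) := by
                    have e0 := congrArg (List.take (p.length - i)) h4
                    rwa [List.take_take, min_eq_left (by omega)] at e0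
                  have e2 : (p.drop i ++ r).take (p.length - i) = p.drop i := by
                    rw [List.take_append_of_le_length (by simp [List.length_drop])]
                    exact List.take_of_length_le (by simp [List.length_drop])
                  have h5 : p.take (p.length - i) = p.drop i := e1.trans e2
                  exact hbf i hilt (by omega) (h5 ▸ List.take_prefix _ _)
                simp only [List.isPrefixOf_iff_prefix]
                constructor
                · intro hcc; exact absurd hcc this
                · intro hcc; simp at hcc; omega
            rw [List.countP_congr hcongr]
            have : (List.range p.length).countP (fun i => i == 0) = (List.range p.length).count 0 := rfl
            rw [this, List.count_eq_one_of_mem (List.nodup_range) (List.mem_range.mpr (by omega))]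
          rw [h1]
          have h2 : (List.countP (fun i => p.isPrefixOf (s.drop i)))
              ((List.range (s.length - p.length)).map fun x => p.length + x) =
              (List.range (s.length - p.length)).countP (fun i => p.isPrefixOf ((s.drop p.length).drop i)) := by
            rw [List.countP_map]
            apply List.countP_congr
            intro i hi
            simp [Function.comp, List.drop_drop]
          rw [h2]
          have h3 : (s.drop p.length).length = s.length - p.length := by simp [List.length_drop]
          rw [h3]
        rw [hocc]
        congr 1
        exact ih (s.drop p.length) (by simp [List.length_drop, hsdef] at hn ⊢; omega)
      · rw [if_neg hpre]
        have hocc : pvOcc p (c :: t) = pvOcc p t := by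
          unfold pvOcc
          simp only [List.length_cons]
          rw [List.range_succ_eq_map, List.countP_cons]
          have h0 : (p.isPrefixOf (List.drop 0 (c :: t))) = false := by
            simp only [List.drop_zero]
            exact Bool.eq_false_iff.mpr hpre
          rw [List.countP_map]
          have : (List.range t.length).countP ((fun i => p.isPrefixOf (List.drop i (c :: t))) ∘ Nat.succ) =
              (List.range t.length).countP (fun i => p.isPrefixOf (t.drop i)) := by
            apply List.countP_congr
            intro i hi
            simp [Function.comp]
          rw [this, h0]
          simp
        rw [hocc]
        exact ih t (by simp at hn; omega)

-- ---------- comment-line automaton vs strip/startswith per line ----------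

theorem pv_rstrip_cons (c : Char) (t : List Char) :
    PySem.Chars.rstrip (c :: t) =
      if (c :: t).all PySem.Chars.isspace then [] else c :: PySem.Chars.rstrip t := by
  unfold PySem.Chars.rstrip
  rw [List.reverse_cons, List.dropWhile_append]
  by_cases ht : (t.reverse.dropWhile PySem.Chars.isspace).isEmpty
  · rw [if_pos ht]
    have htall : ∀ x ∈ t, PySem.Chars.isspace x := by
      intro x hx
      have := List.dropWhile_eq_nil_iff.mp (List.isEmpty_iff.mp ht)
      exact this x (List.mem_reverse.mpr hx)
    by_cases hc : PySem.Chars.isspace c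
    · have : (c :: t).all PySem.Chars.isspace = true := by
        simp [List.all_eq_true]
        exact ⟨hc, htall⟩
      rw [if_pos this]
      simp [List.dropWhile, hc]
    · have : ¬ ((c :: t).all PySem.Chars.isspace = true) := by
        simp [List.all_eq_true]
        intro h
        exact absurd h hc
      rw [if_neg this]
      simp [List.dropWhile, hc]
      exact htall
  · rw [if_neg ht]
    have hne : ¬ ((c :: t).all PySem.Chars.isspace = true) := by
      intro hall
      apply ht
      rw [List.isEmpty_iff, List.dropWhile_eq_nil_iff]
      intro x hx
      exact (List.all_eq_true.mp hall) x (List.mem_cons_of_mem _ (List.mem_reverse.mp hx))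
    rw [if_neg hne]
    simp

theorem pv_C2 : ∀ (t : List Char), '\n' ∉ t → pvC 2 t = 0 := by
  intro t
  induction t with
  | nil => intro _; rfl
  | cons c t ih =>
    intro h
    have hc : c ≠ '\n' := fun hh => h (by simp [hh])
    rw [pvC]
    have h1 : pvIncr 2 c = 0 := by simp [pvIncr, hc]
    have h2 : pvNext 2 c = 2 := by simp [pvNext, hc]
    rw [h1, h2, ih (fun hh => h (List.mem_cons_of_mem _ hh))]
    ring

theorem pv_C1 (t : List Char) (h : '\n' ∉ t) :
    pvC 1 t = if t.head? = some '/' ∨ t.head? = some '*' then 1 else 0 := by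
  cases t with
  | nil => simp [pvC]
  | cons c t =>
    have hc : c ≠ '\n' := fun hh => h (by simp [hh])
    rw [pvC]
    have h2 : pvNext 1 c = 2 := by simp [pvNext, hc]
    rw [h2, pv_C2 t (fun hh => h (List.mem_cons_of_mem _ hh))]
    simp [pvIncr, hc]

theorem pv_strip_cons_space (c : Char) (t : List Char) (hc : PySem.Chars.isspace c = true) :
    PySem.Chars.strip (c :: t) = PySem.Chars.strip t := by
  unfold PySem.Chars.strip PySem.Chars.lstrip
  simp [List.dropWhile, hc]

theorem pv_strip_cons_nonspace (c : Char) (t : List Char) (hc : ¬ (PySem.Chars.isspace c = true)) :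
    PySem.Chars.strip (c :: t) = c :: PySem.Chars.rstrip t := by
  unfold PySem.Chars.strip PySem.Chars.lstrip
  rw [List.dropWhile_cons, if_neg hc, pv_rstrip_cons]
  rw [if_neg (by
    intro hall
    exact hc ((List.all_eq_true.mp hall) c (List.mem_cons_self)))]

theorem pv_space_facts (c : Char) (hc : PySem.Chars.isspace c = true) : c ≠ '/' ∧ c ≠ '*' := by
  constructor
  · intro h; subst h; simp [PySem.Chars.isspace] at hc
  · intro h; subst h; simp [PySem.Chars.isspace] at hc

theorem pv_line (s : List Char) (h : '\n' ∉ s) :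
    pvC 0 s = if pvPred s then 1 else 0 := by
  induction s with
  | nil => simp [pvC, pvPred]; decide
  | cons c t ih =>
    have hc : c ≠ '\n' := fun hh => h (by simp [hh])
    have ht : '\n' ∉ t := fun hh => h (List.mem_cons_of_mem _ hh)
    by_cases hsp : PySem.Chars.isspace c
    · rw [pvC]
      have h1 : pvIncr 0 c = 0 := by simp [pvIncr, hc, hsp]
      have h2 : pvNext 0 c = 0 := by simp [pvNext, hc, hsp]
      rw [h1, h2, ih ht]
      have h3 : pvPred (c :: t) = pvPred t := by
        unfold pvPred
        rw [pv_strip_cons_space c t hsp]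
      rw [h3]
      ring
    · by_cases hstar : c = '*'
      · subst hstar
        rw [pvC]
        have h1 : pvIncr 0 '*' = 1 := by simp [pvIncr, hsp]
        have h2 : pvNext 0 '*' = 2 := by simp [pvNext, hsp]
        rw [h1, h2, pv_C2 t ht]
        have h3 : pvPred ('*' :: t) = true := by
          unfold pvPred
          rw [pv_strip_cons_nonspace _ _ hsp]
          simp [PySem.Chars.startswith, List.isPrefixOf]
        rw [h3]
        norm_num
      · by_cases hsl : c = '/'
        · subst hsl
          rw [pvC]
          have h1 : pvIncr 0 '/' = 0 := by simp [pvIncr, hsp]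
          have h2 : pvNext 0 '/' = 1 := by simp [pvNext, hsp]
          rw [h1, h2, pv_C1 t ht]
          have h3 : pvPred ('/' :: t) =
              ((PySem.Chars.rstrip t).head? = some '/' ∨ (PySem.Chars.rstrip t).head? = some '*' : Bool) := by
            unfold pvPred
            rw [pv_strip_cons_nonspace _ _ hsp]
            cases hr : PySem.Chars.rstrip t with
            | nil => simp [PySem.Chars.startswith, List.isPrefixOf]
            | cons d r =>
              simp [PySem.Chars.startswith, List.isPrefixOf]
              by_cases hd : d = '/'
              · simp [hd]
              · by_cases hd2 : d = '*'
                · simp [hd, hd2]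
                · simp only [hd, hd2]
                  simp
                  exact ⟨fun hh => hd hh.symm, fun hh => hd2 hh.symm⟩
          rw [h3]
          -- relate head? of rstrip t with head? of t
          cases t with
          | nil => simp [PySem.Chars.rstrip]
          | cons d r =>
            rw [pv_rstrip_cons]
            by_cases hall : (d :: r).all PySem.Chars.isspace
            · rw [if_pos hall]
              have hd : PySem.Chars.isspace d := (List.all_eq_true.mp hall) d List.mem_cons_self
              have ⟨hd1, hd2⟩ := pv_space_facts d hd
              simp [hd1, hd2]
            · rw [if_neg hall]
              simp
        · rw [pvC]
          have h1 : pvIncr 0 c = 0 := by simp [pvIncr, hc, hsp, hstar]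
          have h2 : pvNext 0 c = 2 := by simp [pvNext, hc, hsp, hstar, hsl]
          rw [h1, h2, pv_C2 t ht]
          have h3 : pvPred (c :: t) = false := by
            unfold pvPred
            rw [pv_strip_cons_nonspace _ _ hsp]
            simp [PySem.Chars.startswith, List.isPrefixOf]
            refine ⟨⟨fun hh => absurd hh.symm hsl, fun hh => absurd hh.symm hsl⟩, fun hh => hstar hh.symm⟩
          rw [h3]
          norm_num

-- ---------- splitOn machinery ----------

theorem pv_sgo_stable : ∀ (n fuel fuel' : Nat) (l cur : List Char) (acc : List (List Char)),
    l.length ≤ n → l.length ≤ fuel → l.length ≤ fuel' →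
    PySem.Chars.splitOn.go ['\n'] fuel l cur acc = PySem.Chars.splitOn.go ['\n'] fuel' l cur acc := by
  intro n
  induction n with
  | zero =>
    intro fuel fuel' l cur acc hn _ _
    have : l = [] := List.eq_nil_of_length_eq_zero (Nat.le_zero.mp hn)
    subst this
    cases fuel <;> cases fuel' <;> simp [PySem.Chars.splitOn.go]
  | succ m ih =>
    intro fuel fuel' l cur acc hn hf hf'
    cases l with
    | nil => cases fuel <;> cases fuel' <;> simp [PySem.Chars.splitOn.go]
    | cons c t =>
      simp only [List.length_cons] at hn hf hf'
      obtain ⟨f, rfl⟩ : ∃ f, fuel = f + 1 := ⟨fuel - 1, by omega⟩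
      obtain ⟨f', rfl⟩ : ∃ f', fuel' = f' + 1 := ⟨fuel' - 1, by omega⟩
      rw [PySem.Chars.splitOn.go, PySem.Chars.splitOn.go]
      split
      · exact ih f f' _ [] _ (by simp; omega) (by simp; omega) (by simp; omega)
      · exact ih f f' t (c :: cur) acc (by omega) (by omega) (by omega)

theorem pv_sgo_no : ∀ (l : List Char), '\n' ∉ l → ∀ (fuel : Nat) (cur : List Char) (acc : List (List Char)),
    l.length ≤ fuel →
    PySem.Chars.splitOn.go ['\n'] fuel l cur acc = ((cur.reverse ++ l) :: acc).reverse := by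
  intro l
  induction l with
  | nil => intro _ fuel cur acc _; cases fuel <;> simp [PySem.Chars.splitOn.go]
  | cons c t ih =>
    intro hm fuel cur acc hf
    simp only [List.length_cons] at hf
    obtain ⟨f, rfl⟩ : ∃ f, fuel = f + 1 := ⟨fuel - 1, by omega⟩
    rw [PySem.Chars.splitOn.go]
    have hc : c ≠ '\n' := fun h => hm (by simp [h])
    have hpf : ¬ (['\n'].isPrefixOf (c :: t) = true) := by
      simp [List.isPrefixOf]
      intro h
      exact absurd h.symm hc
    rw [if_neg hpf]
    rw [ih (fun h => hm (List.mem_cons_of_mem _ h)) f (c :: cur) acc (by omega)]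
    simp

theorem pv_sgo_acc : ∀ (n : Nat) (l : List Char), l.length ≤ n →
    ∀ (fuel : Nat) (cur : List Char) (acc : List (List Char)), l.length ≤ fuel →
    PySem.Chars.splitOn.go ['\n'] fuel l cur acc =
      acc.reverse ++ PySem.Chars.splitOn.go ['\n'] fuel l cur [] := by
  intro n
  induction n with
  | zero =>
    intro l hn fuel cur acc _
    have : l = [] := List.eq_nil_of_length_eq_zero (Nat.le_zero.mp hn)
    subst this
    cases fuel <;> simp [PySem.Chars.splitOn.go]
  | succ m ih =>
    intro l hn fuel cur acc hf
    cases l with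
    | nil => cases fuel <;> simp [PySem.Chars.splitOn.go]
    | cons c t =>
      simp only [List.length_cons] at hn hf
      obtain ⟨f, rfl⟩ : ∃ f, fuel = f + 1 := ⟨fuel - 1, by omega⟩
      rw [PySem.Chars.splitOn.go, PySem.Chars.splitOn.go]
      split
      · rw [ih _ (by simp; omega) f [] (cur.reverse :: acc) (by simp; omega),
            ih _ (by simp; omega) f [] [cur.reverse] (by simp; omega)]
        simp
      · rw [ih t (by omega) f (c :: cur) acc (by omega)]

theorem pv_sgo_line : ∀ (pre : List Char), '\n' ∉ pre →
    ∀ (rest : List Char) (fuel : Nat) (cur : List Char) (acc : List (List Char)),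
    pre.length + 1 + rest.length ≤ fuel →
    PySem.Chars.splitOn.go ['\n'] fuel (pre ++ '\n' :: rest) cur acc =
      PySem.Chars.splitOn.go ['\n'] rest.length rest [] ((cur.reverse ++ pre) :: acc) := by
  intro pre
  induction pre with
  | nil =>
    intro _ rest fuel cur acc hf
    simp only [List.length_nil, List.nil_append] at hf ⊢
    obtain ⟨f, rfl⟩ : ∃ f, fuel = f + 1 := ⟨fuel - 1, by omega⟩
    rw [PySem.Chars.splitOn.go]
    have hpf : ['\n'].isPrefixOf ('\n' :: rest) = true := by simp [List.isPrefixOf]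
    rw [if_pos hpf]
    simp only [List.length_singleton, List.drop_one, List.tail_cons]
    rw [pv_sgo_stable rest.length f rest.length rest [] _ (le_refl _) (by omega) (le_refl _)]
    simp
  | cons p pt ih =>
    intro hm rest fuel cur acc hf
    simp only [List.length_cons] at hf
    obtain ⟨f, rfl⟩ : ∃ f, fuel = f + 1 := ⟨fuel - 1, by omega⟩
    rw [List.cons_append, PySem.Chars.splitOn.go]
    have hp : p ≠ '\n' := fun h => hm (by simp [h])
    have hpf : ¬ (['\n'].isPrefixOf (p :: (pt ++ '\n' :: rest)) = true) := by
      simp [List.isPrefixOf]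
      intro h
      exact absurd h.symm hp
    rw [if_neg hpf]
    rw [ih (fun h => hm (List.mem_cons_of_mem _ h)) rest f (p :: cur) acc (by omega)]
    simp

theorem pv_splitOn_no (s : List Char) (h : '\n' ∉ s) : PySem.Chars.splitOn s ['\n'] = [s] := by
  rw [PySem.Chars.splitOn, pv_sgo_no s h (s.length + 1) [] [] (by omega)]
  simp

theorem pv_splitOn_split (pre rest : List Char) (hpre : '\n' ∉ pre) :
    PySem.Chars.splitOn (pre ++ '\n' :: rest) ['\n'] = pre :: PySem.Chars.splitOn rest ['\n'] := by
  rw [PySem.Chars.splitOn]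
  rw [pv_sgo_line pre hpre rest _ [] [] (by simp; omega)]
  simp only [List.reverse_nil, List.nil_append]
  rw [pv_sgo_acc rest.length rest (le_refl _) rest.length [] [pre] (le_refl _)]
  rw [PySem.Chars.splitOn]
  rw [pv_sgo_stable rest.length rest.length (rest.length + 1) rest [] [] (le_refl _) (le_refl _) (by omega)]
  simp

-- ---------- whole-string comment count ----------

theorem pv_C_append : ∀ (a : List Char) (st : Int) (b : List Char),
    pvC st (a ++ b) = pvC st a + pvC (pvS st a) b := by
  intro a
  induction a with
  | nil => intro st b; simp [pvC, pvS]
  | cons c t ih =>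
    intro st b
    rw [List.cons_append, pvC, pvC, pvS, ih]
    ring

theorem pv_C_split : ∀ (n : Nat) (s : List Char), s.length ≤ n →
    pvC 0 s = ((PySem.Chars.splitOn s ['\n']).countP pvPred : Int) := by
  intro n
  induction n with
  | zero =>
    intro s hn
    have : s = [] := List.eq_nil_of_length_eq_zero (Nat.le_zero.mp hn)
    subst this
    rw [pv_splitOn_no [] (by simp)]
    simp [pvC, List.countP_cons]
  | succ m ih =>
    intro s hn
    by_cases hm : '\n' ∈ s
    · have hsplit := (List.takeWhile_append_dropWhile (p := fun c => c != '\n') (l := s)).symm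
      set pre := s.takeWhile (fun c => c != '\n') with hpre
      set d := s.dropWhile (fun c => c != '\n') with hd
      have hpnl : '\n' ∉ pre := by
        intro hc
        have := List.mem_takeWhile_imp hc
        simp at this
      have hdne : d ≠ [] := by
        intro hc
        rw [hc, List.append_nil] at hsplit
        rw [hsplit] at hm
        exact hpnl hm
      have hhead := List.head_dropWhile_not (fun c => c != '\n') (l := s) (by rw [← hd]; exact hdne)
      have hcn : d.head hdne = '\n' := by
        have h2 := hhead
        simp only [bne_eq_false_iff_eq] at h2
        exact h2
      have hcr : d = '\n' :: d.tail := by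
        rw [← hcn]
        exact (List.cons_head_tail hdne).symm
      set rest := d.tail with hrest
      rw [hcr] at hsplit
      rw [hsplit]
      rw [pv_splitOn_split pre rest hpnl]
      have hlen : rest.length ≤ m := by
        have := congrArg List.length hsplit
        simp at this
        omega
      have hC : pvC 0 (pre ++ '\n' :: rest) = pvC 0 pre + pvC 0 rest := by
        have h1 : pre ++ '\n' :: rest = (pre ++ ['\n']) ++ rest := by simp
        rw [h1, pv_C_append, pv_C_append]
        have h2 : pvC (pvS 0 pre) ['\n'] = 0 := by
          rw [pvC, pvC, pvIncr]
          simp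
        have h3 : pvS 0 (pre ++ ['\n']) = 0 := by
          have := pv_C_append
          clear this
          have hS : ∀ (a : List Char) (st : Int) (b : List Char), pvS st (a ++ b) = pvS (pvS st a) b := by
            intro a
            induction a with
            | nil => intro st b; simp [pvS]
            | cons c t ih2 => intro st b; rw [List.cons_append, pvS, pvS, ih2]
          rw [hS]
          rw [pvS, pvS, pvNext]
          simp
        rw [h2, h3]
        ring
      rw [hC, List.countP_cons, pv_line pre hpnl, ih rest hlen]
      push_cast
      split_ifs <;> ring
    · rw [pv_splitOn_no s hm, pv_line s hm]
      simp [List.countP_cons]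

theorem pv_split_some (content : String) :
    ∃ L, PySem.Str.split? content "\n" = some L ∧
      L.map String.toList = PySem.Chars.splitOn content.toList ['\n'] := by
  have hmap := PySem.Str.split?_map content "\n"
  cases hL : PySem.Str.split? content "\n" with
  | none =>
    rw [hL] at hmap
    simp [PySem.Chars.split?] at hmap
  | some L =>
    refine ⟨L, rfl, ?_⟩
    rw [hL] at hmap
    simp [PySem.Chars.split?] at hmap
    exact hmap

-- ---------- main ----------

theorem pv_F_total (p : List Char) (h2 : 2 ≤ p.length) (h9 : p.length ≤ 9)
    (hbf : pvBorderFree p) (s : List Char) :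
    pvF p [] s = (PySem.Chars.count s p : Int) := by
  have hw : pvWin [] = ([] : List Char) := rfl
  rw [← hw, pv_F_eq_E p h9 s [], pv_E_occ p h2 s []]
  rw [pv_count_eq_occ p h2 hbf s.length s (le_refl _)]
  simp [pvOcc]

theorem pv_main (content : String) :
    analyze_js_code_py content = analyze_js_code_py_alt content := by
  obtain ⟨L, hL, hmap⟩ := pv_split_some content
  unfold analyze_js_code_py analyze_js_code_py_alt
  simp only [hL, Option.getD_some]
  rw [pv_fold_decomp]
  have hcomment : (((L.filter (fun line =>
        PySem.Str.startswith (PySem.Str.strip line) "//" ||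
        PySem.Str.startswith (PySem.Str.strip line) "/*" ||
        PySem.Str.startswith (PySem.Str.strip line) "*")).length : Int))
      = pvC 0 content.toList := by
    rw [pv_C_split content.toList.length content.toList (le_refl _), ← hmap, List.countP_map]
    rw [← List.countP_eq_length_filter]
    have hcc : L.countP (fun line =>
        PySem.Str.startswith (PySem.Str.strip line) "//" ||
        PySem.Str.startswith (PySem.Str.strip line) "/*" ||
        PySem.Str.startswith (PySem.Str.strip line) "*") = L.countP (pvPred ∘ String.toList) := by
      apply List.countP_congr
      intro line _
      simp [pvPred, Function.comp]
    rw [hcc]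
  have hfun : pvF ("function ".toList) [] content.toList = (PySem.Str.count content "function " : Int) :=
    pv_F_total ("function ".toList) (by decide) (by decide) (by unfold pvBorderFree; decide) content.toList
  have harr : pvF ("=>".toList) [] content.toList = (PySem.Str.count content "=>" : Int) :=
    pv_F_total ("=>".toList) (by decide) (by decide) (by unfold pvBorderFree; decide) content.toList
  have hcls : pvF ("class ".toList) [] content.toList = (PySem.Str.count content "class " : Int) :=
    pv_F_total ("class ".toList) (by decide) (by decide) (by unfold pvBorderFree; decide) content.toList
  rw [hfun, harr, hcls]
  simp only [List.cons.injEq, Prod.mk.injEq]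
  refine ⟨⟨trivial, by rw [hcomment]; ring⟩, ⟨trivial, by ring⟩, ⟨trivial, by ring⟩, trivial⟩

-- ===== VERDICT (by name: the statement is the Claim_ definition above) =====
theorem analyze_js_code_py_spec : Claim_equal_analyze_js_code_py := by
  intro content _
  exact pv_main content
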